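-- pv_equiv track=rewrite | github.com/jdpreuth/partialcat | partialcat.py | lowercase
-- ===== SOURCE A (Python) =====
-- from itertools import product
--
-- def lowercase(words):
-- 	parsed = set([])
-- 	for word in words:
-- 		sub = {}
-- 		for letter in word:
-- 			sub.update({letter: letter.lower()})
-- 		parsed.add(word)
-- 		parsed.update([''.join(letters) for letters in product(*({c, sub.get(c, c)} for c in word))])
-- 	return parsed
-- ===== SOURCE B (Python) =====
-- def _variant(word, m, k):
--     # lowercase exactly the mutable positions whose bit (MSB-first) is set in m
--     out = []
--     for c in word:
--         lc = c.lower()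
--         if lc == c:
--             out.append(c)
--         else:
--             k -= 1
--             out.append(lc if (m >> k) & 1 else c)
--     return ''.join(out)
--
-- def lowercase(words):
--     parsed = set()
--     for word in words:
--         k = sum(1 for c in word if c != c.lower())
--         for m in range(2 ** k):
--             parsed.add(_variant(word, m, k))
--     return parsed
-- ===== Notes on version B (the rewrite author's own statement) =====
-- stated objective: faster
-- what changed: B drops A's per-letter dict and itertools.product over per-character {c, c.lower()} sets and instead counts the k case-mutable characters of each word and enumerates all 2^k variants directly by bitmask, lowercasing exactly the positions selected by the mask's bits (mask 0 yields the word itself, so no separate add).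
import Mathlib
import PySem

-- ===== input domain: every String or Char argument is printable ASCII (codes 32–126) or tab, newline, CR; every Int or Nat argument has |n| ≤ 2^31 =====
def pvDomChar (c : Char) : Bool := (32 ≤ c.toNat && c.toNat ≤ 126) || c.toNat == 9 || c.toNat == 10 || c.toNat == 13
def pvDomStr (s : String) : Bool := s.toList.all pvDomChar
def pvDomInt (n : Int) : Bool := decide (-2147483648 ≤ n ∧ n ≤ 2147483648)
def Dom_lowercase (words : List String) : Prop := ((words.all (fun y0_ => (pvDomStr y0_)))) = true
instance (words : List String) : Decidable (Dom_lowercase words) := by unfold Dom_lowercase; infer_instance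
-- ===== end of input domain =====

-- B replaces A's per-character {c, c.lower()} sets, dict and itertools.product by direct
-- bitmask enumeration of the 2^k variants (k = number of characters that change under lower());
-- objective: faster by a constant factor (no per-word dict, set objects or product-tuple machinery). Return value only; no mutation.

-- ===== PORT A =====
-- itertools.product over a list of per-position alternative lists (first coordinate varies slowest)
def pvProduct : List (List Char) → List (List Char)
  | [] => [[]]
  | xs :: rest => xs.flatMap (fun x => (pvProduct rest).map (fun t => x :: t))

def lowercase (words : List String) : List String :=
  words.foldl (fun parsed word =>
    let cs := word.toList
    let sub : PySem.Dict Char Char :=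
      cs.foldl (fun d letter => d.insert letter (PySem.Chars.lowerChar letter)) PySem.Dict.empty
    let parsed1 := PySem.Set.add parsed word
    -- [''.join(letters) for letters in product(*({c, sub.get(c, c)} for c in word))]
    let variants := (pvProduct (cs.map (fun c => PySem.Set.ofList [c, sub.getD c c]))).map
        (fun letters => String.ofList letters)
    PySem.Set.update parsed1 variants) []

-- ===== PORT B =====
-- _variant(word, m, k): lowercase exactly the mutable positions whose (MSB-first) bit of m is set
def pvVariant : List Char → Nat → Nat → List Char
  | [], _, _ => []
  | c :: rest, m, k =>
    let lc := PySem.Chars.lowerChar c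
    if lc = c then c :: pvVariant rest m k
    else (if (m >>> (k - 1)) % 2 = 1 then lc else c) :: pvVariant rest m (k - 1)

def lowercase_alt (words : List String) : List String :=
  words.foldl (fun parsed word =>
    let cs := word.toList
    let k := (cs.filter (fun c => c ≠ PySem.Chars.lowerChar c)).length
    (List.range (2 ^ k)).foldl
      (fun p m => PySem.Set.add p (String.ofList (pvVariant cs m k))) parsed) []

-- ===== PRECONDITION & SPEC =====
def Spec_lowercase (words : List String) (out : List String) : Prop := out = lowercase_alt words
instance (words : List String) (out : List String) : Decidable (Spec_lowercase words out) := by unfold Spec_lowercase; infer_instance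

-- ===== CLAIM (what is proved, stated in full; the proofs are below) =====
def Claim_equal_lowercase : Prop := ∀ (words : List String), Dom_lowercase words → Spec_lowercase words (lowercase words)

-- ===== LEMMAS AND PROOFS =====

-- number of mutable characters
def pvMcount (cs : List Char) : Nat := (cs.filter (fun c => c ≠ PySem.Chars.lowerChar c)).length

-- the per-position alternative list with non-mutable positions a singleton
def pvChoice (c : Char) : List Char :=
  if PySem.Chars.lowerChar c = c then [c] else [c, PySem.Chars.lowerChar c]

-- keys not inserted by the loop keep their lookup
theorem pv_getD_foldl_not_mem (l : List Char) (d : PySem.Dict Char Char) (c v : Char)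
    (h : c ∉ l) :
    (l.foldl (fun d x => d.insert x (PySem.Chars.lowerChar x)) d).getD c v = d.getD c v := by
  induction l generalizing d with
  | nil => rfl
  | cons a rest ih =>
      simp only [List.mem_cons, not_or] at h
      simp only [List.foldl_cons]
      rw [ih _ h.2, PySem.Dict.getD_insert_of_ne (hne := h.1)]

-- A's dict sub maps every letter of the word to its lowercase form
theorem pv_sub_getD (cs : List Char) (d : PySem.Dict Char Char) (c : Char) (h : c ∈ cs) :
    (cs.foldl (fun d x => d.insert x (PySem.Chars.lowerChar x)) d).getD c c
      = PySem.Chars.lowerChar c := by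
  induction cs generalizing d with
  | nil => cases h
  | cons a rest ih =>
      simp only [List.foldl_cons]
      by_cases hr : c ∈ rest
      · exact ih _ hr
      · have hc : c = a := by
          rcases List.mem_cons.mp h with h | h
          · exact h
          · exact absurd h hr
        subst hc
        rw [pv_getD_foldl_not_mem _ _ _ _ hr, PySem.Dict.getD_insert_self]

theorem pv_set_pair (c : Char) :
    PySem.Set.ofList [c, PySem.Chars.lowerChar c] = pvChoice c := by
  by_cases h : PySem.Chars.lowerChar c = c <;>
    simp [pvChoice, PySem.Set.ofList, PySem.Set.add, PySem.Set.contains, h]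

theorem pv_variant_zero (cs : List Char) (k : Nat) : pvVariant cs 0 k = cs := by
  induction cs generalizing k with
  | nil => rfl
  | cons c rest ih => by_cases h : PySem.Chars.lowerChar c = c <;> simp [pvVariant, h, ih]

-- a set bit at position ≥ k does not affect the variant when at most k bits are read
theorem pv_variant_high (cs : List Char) (k K j : Nat) (hb : pvMcount cs ≤ k) (hk : k ≤ K) :
    pvVariant cs (j + 2 ^ K) k = pvVariant cs j k := by
  induction cs generalizing k j with
  | nil => rfl
  | cons c rest ih =>
      by_cases h : PySem.Chars.lowerChar c = c
      · have hb' : pvMcount rest ≤ k := by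
          have h2 : c = PySem.Chars.lowerChar c := h.symm
          simpa [pvMcount, List.filter_cons, if_pos h2] using hb
        simp [pvVariant, h, ih _ _ hb' hk]
      · have hb' : pvMcount rest + 1 ≤ k := by
          have : pvMcount (c :: rest) = pvMcount rest + 1 := by
            unfold pvMcount
            rw [List.filter_cons, if_pos (by simpa using fun e : c = PySem.Chars.lowerChar c => h e.symm)]
            rfl
          omega
      -- bit positions k-1 < K agree between j and j + 2^K
        have hlt : k - 1 < K := by omega
        have hbit : ((j + 2 ^ K) >>> (k - 1)) % 2 = (j >>> (k - 1)) % 2 := by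
          rw [Nat.shiftRight_eq_div_pow, Nat.shiftRight_eq_div_pow]
          have hpow : 2 ^ K = 2 ^ (K - (k - 1) - 1) * 2 * 2 ^ (k - 1) := by
            rw [mul_assoc, ← pow_succ']
            rw [← pow_add]
            congr 1
            omega
          rw [hpow, Nat.add_mul_div_right _ _ (Nat.pow_pos (by norm_num)),
            Nat.add_mul_mod_self_right]
        simp only [pvVariant]
        rw [if_neg h, if_neg h, hbit, ih _ _ (by omega) (by omega)]

-- MAIN LEMMA: the cartesian product of the alternative lists is exactly the bitmask enumeration
theorem pv_product_eq_masks (cs : List Char) :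
    pvProduct (cs.map pvChoice)
      = (List.range (2 ^ pvMcount cs)).map (fun m => pvVariant cs m (pvMcount cs)) := by
  induction cs with
  | nil => rfl
  | cons c rest ih =>
      by_cases h : PySem.Chars.lowerChar c = c
      · have hm : pvMcount (c :: rest) = pvMcount rest := by
          simp [pvMcount, List.filter_cons, h]
        simp only [List.map_cons, pvProduct, pvChoice, if_pos h, List.flatMap_cons,
          List.flatMap_nil, List.append_nil, ih, List.map_map, hm]
        refine List.map_congr_left (fun m hm' => ?_)
        simp [pvVariant, h]
      · have hm : pvMcount (c :: rest) = pvMcount rest + 1 := by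
          unfold pvMcount
          rw [List.filter_cons, if_pos (by simpa using fun e : c = PySem.Chars.lowerChar c => h e.symm)]
          rfl
        set k := pvMcount rest with hk
        simp only [List.map_cons, pvProduct, pvChoice, if_neg h, List.flatMap_cons,
          List.flatMap_nil, List.append_nil, ih, List.map_map, hm]
        have hsplit : (2 : Nat) ^ (k + 1) = 2 ^ k + 2 ^ k := by ring
        rw [hsplit, List.range_add, List.map_append, List.map_map]
        congr 1
        · refine List.map_congr_left (fun m hmem => ?_)
          have hmlt : m < 2 ^ k := List.mem_range.mp hmem
          have hz : (m >>> k) % 2 = 0 := by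
            rw [Nat.shiftRight_eq_div_pow, Nat.div_eq_of_lt hmlt]
          simp [pvVariant, h, hz]
        · refine List.map_congr_left (fun j hmem => ?_)
          have hjlt : j < 2 ^ k := List.mem_range.mp hmem
          have hone : ((2 ^ k + j) >>> k) % 2 = 1 := by
            rw [Nat.shiftRight_eq_div_pow, Nat.add_comm,
              Nat.add_div_right _ (Nat.pow_pos (by norm_num)),
              Nat.div_eq_of_lt hjlt]
          have htail : pvVariant rest (2 ^ k + j) k = pvVariant rest j k := by
            rw [Nat.add_comm]
            exact pv_variant_high rest k k j le_rfl le_rfl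
          simp [pvVariant, h, hone, htail]

theorem pv_add_add_self (s : List String) (a : String) :
    PySem.Set.add (PySem.Set.add s a) a = PySem.Set.add s a := by
  by_cases h : a ∈ s <;> simp [PySem.Set.add, PySem.Set.contains, h]

theorem pv_update_cons_self (parsed : List String) (w : String) (t : List String) :
    PySem.Set.update (PySem.Set.add parsed w) (w :: t) = PySem.Set.update parsed (w :: t) := by
  simp only [PySem.Set.update, List.foldl_cons, pv_add_add_self]

-- A's whole per-word step equals B's whole per-word step
theorem pv_step_eq (parsed : List String) (word : String) :
    (let cs := word.toList
     let sub : PySem.Dict Char Char :=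
       cs.foldl (fun d letter => d.insert letter (PySem.Chars.lowerChar letter)) PySem.Dict.empty
     let parsed1 := PySem.Set.add parsed word
     let variants := (pvProduct (cs.map (fun c => PySem.Set.ofList [c, sub.getD c c]))).map
         (fun letters => String.ofList letters)
     PySem.Set.update parsed1 variants)
    = (let cs := word.toList
       let k := (cs.filter (fun c => c ≠ PySem.Chars.lowerChar c)).length
       (List.range (2 ^ k)).foldl
         (fun p m => PySem.Set.add p (String.ofList (pvVariant cs m k))) parsed) := by
  show PySem.Set.update (PySem.Set.add parsed word)
      ((pvProduct (word.toList.map (fun c => PySem.Set.ofList [c,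
          (word.toList.foldl (fun d letter => d.insert letter (PySem.Chars.lowerChar letter))
            PySem.Dict.empty).getD c c]))).map (fun letters => String.ofList letters))
    = (List.range (2 ^ pvMcount word.toList)).foldl
        (fun p m => PySem.Set.add p (String.ofList (pvVariant word.toList m (pvMcount word.toList)))) parsed
  have hmap : word.toList.map (fun c => PySem.Set.ofList [c,
      (word.toList.foldl (fun d letter => d.insert letter (PySem.Chars.lowerChar letter))
        PySem.Dict.empty).getD c c]) = word.toList.map pvChoice :=
    List.map_congr_left (fun c hc => by rw [pv_sub_getD _ _ _ hc, pv_set_pair])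
  rw [hmap, pv_product_eq_masks, List.map_map]
  rw [← PySem.Set.update_map_eq_foldl_add]
  obtain ⟨p, hp⟩ := Nat.exists_eq_add_of_lt (Nat.two_pow_pos (pvMcount word.toList))
  rw [Nat.zero_add] at hp
  rw [hp, List.range_succ_eq_map, List.map_cons]
  simp only [List.map_cons, List.map_map, Function.comp_apply, pv_variant_zero, String.ofList_toList]
  exact pv_update_cons_self parsed word _

-- ===== VERDICT (by name: the statement is the Claim_ definition above) =====
theorem lowercase_spec : Claim_equal_lowercase := by
  intro words hdom
  show lowercase words = lowercase_alt words
  clear hdom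
  unfold lowercase lowercase_alt
  induction words using List.reverseRecOn with
  | nil => rfl
  | append_singleton init w ih =>
      rw [List.foldl_append, List.foldl_append, ih, List.foldl_cons, List.foldl_cons,
        List.foldl_nil, List.foldl_nil]
      exact pv_step_eq _ w
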